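-- pv_equiv track=rewrite | github.com/cubiculus/Mikrotik_audit | src/auditor.py | _group_commands_by_priority
-- ===== SOURCE A (Python) =====
-- from typing import List, Optional
--
-- def _group_commands_by_priority(commands: List[str]) -> dict:
--     """Group commands by priorities."""
--     fast_commands_set = {
--         '/system identity print',
--         '/system resource print',
--         '/system clock print',
--         '/interface print stats',
--     }
--     heavy_commands_set = {
--         '/tool sniffer quick',
--         '/ip firewall filter print detail',
--         '/ip firewall nat print detail',
--     }
--     dependent_commands_set = {
--         '/export hide-sensitive',
--     }
--
--     # Use sets for O(1) lookup instead of O(n) with lists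
--     fast = [c for c in commands if any(f in c for f in fast_commands_set)]
--     heavy = [c for c in commands if any(h in c for h in heavy_commands_set)]
--     dependent = [c for c in commands if any(d in c for d in dependent_commands_set)]
--     already_grouped = set(fast + heavy + dependent)
--     normal = [c for c in commands if c not in already_grouped]
--
--     return {
--         'fast': fast,
--         'heavy': heavy,
--         'dependent': dependent,
--         'normal': normal
--     }
-- ===== SOURCE B (Python) =====
-- from typing import List, Optional
--
-- def _group_commands_by_priority(commands: List[str]) -> dict:
--     """Group commands by priorities (single pass over commands)."""
--     fast_commands_set = {
--         '/system identity print',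
--         '/system resource print',
--         '/system clock print',
--         '/interface print stats',
--     }
--     heavy_commands_set = {
--         '/tool sniffer quick',
--         '/ip firewall filter print detail',
--         '/ip firewall nat print detail',
--     }
--     dependent_commands_set = {
--         '/export hide-sensitive',
--     }
--
--     fast, heavy, dependent, normal = [], [], [], []
--     for c in commands:
--         matched = False
--         if any(f in c for f in fast_commands_set):
--             fast.append(c)
--             matched = True
--         if any(h in c for h in heavy_commands_set):
--             heavy.append(c)
--             matched = True
--         if any(d in c for d in dependent_commands_set):
--             dependent.append(c)
--             matched = True
--         if not matched:
--             normal.append(c)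
--
--     return {
--         'fast': fast,
--         'heavy': heavy,
--         'dependent': dependent,
--         'normal': normal
--     }
-- ===== Notes on version B (the rewrite author's own statement) =====
-- stated objective: simpler
-- what changed: Replaces A's four separate passes over commands (three filter comprehensions plus a set-difference pass) by one loop that classifies each command once with parallel if-tests and a matched flag.
import Mathlib
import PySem

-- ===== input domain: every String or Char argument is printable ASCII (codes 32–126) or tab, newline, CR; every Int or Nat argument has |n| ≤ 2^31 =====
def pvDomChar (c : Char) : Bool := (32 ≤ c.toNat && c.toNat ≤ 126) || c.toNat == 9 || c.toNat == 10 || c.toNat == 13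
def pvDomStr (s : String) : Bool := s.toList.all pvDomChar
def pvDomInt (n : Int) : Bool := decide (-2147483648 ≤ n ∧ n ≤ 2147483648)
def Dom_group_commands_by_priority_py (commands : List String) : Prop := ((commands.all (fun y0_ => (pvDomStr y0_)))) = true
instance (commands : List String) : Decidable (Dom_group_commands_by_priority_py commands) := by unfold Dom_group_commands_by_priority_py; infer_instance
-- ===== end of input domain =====

-- B replaces A's four separate passes over commands by one classifying loop with parallel if-tests: simpler, same cost.


-- ===== PORT A =====
-- the three pattern sets (Python set literals of distinct strings; only iterated by `any`/membership, order irrelevant)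
def pvFastPats : PySem.Set String :=
  PySem.Set.ofList ["/system identity print", "/system resource print", "/system clock print", "/interface print stats"]
def pvHeavyPats : PySem.Set String :=
  PySem.Set.ofList ["/tool sniffer quick", "/ip firewall filter print detail", "/ip firewall nat print detail"]
def pvDepPats : PySem.Set String :=
  PySem.Set.ofList ["/export hide-sensitive"]

def group_commands_by_priority_py (commands : List String) : List (String × List String) :=
  let fast := commands.filter (fun c => pvFastPats.any (fun f => PySem.Str.isIn f c))
  let heavy := commands.filter (fun c => pvHeavyPats.any (fun h => PySem.Str.isIn h c))
  let dependent := commands.filter (fun c => pvDepPats.any (fun d => PySem.Str.isIn d c))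
  let already_grouped := PySem.Set.ofList (fast ++ heavy ++ dependent)
  let normal := commands.filter (fun c => !(PySem.Set.contains already_grouped c))
  [("fast", fast), ("heavy", heavy), ("dependent", dependent), ("normal", normal)]

-- ===== PORT B =====
-- one classifying step per command: parallel if-tests plus a `matched` flag
def pvStepB (st : List String × List String × List String × List String) (c : String) :
    List String × List String × List String × List String :=
  let (fast, heavy, dependent, normal) := st
  let mf := pvFastPats.any (fun f => PySem.Str.isIn f c)
  let mh := pvHeavyPats.any (fun h => PySem.Str.isIn h c)
  let md := pvDepPats.any (fun d => PySem.Str.isIn d c)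
  let matched := mf || mh || md
  ((if mf then fast ++ [c] else fast),
   (if mh then heavy ++ [c] else heavy),
   (if md then dependent ++ [c] else dependent),
   (if !matched then normal ++ [c] else normal))

def group_commands_by_priority_py_alt (commands : List String) : List (String × List String) :=
  let r := commands.foldl pvStepB ([], [], [], [])
  [("fast", r.1), ("heavy", r.2.1), ("dependent", r.2.2.1), ("normal", r.2.2.2)]

-- ===== PRECONDITION & SPEC =====
def Spec_group_commands_by_priority_py (commands : List String) (out : List (String × List String)) : Prop := out = group_commands_by_priority_py_alt commands
instance (commands : List String) (out : List (String × List String)) : Decidable (Spec_group_commands_by_priority_py commands out) := by unfold Spec_group_commands_by_priority_py; infer_instance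

-- ===== CLAIM (what is proved, stated in full; the proofs are below) =====
def Claim_equal_group_commands_by_priority_py : Prop := ∀ (commands : List String), Dom_group_commands_by_priority_py commands → Spec_group_commands_by_priority_py commands (group_commands_by_priority_py commands)

-- ===== LEMMAS AND PROOFS =====

def pvMF (c : String) : Bool := pvFastPats.any (fun f => PySem.Str.isIn f c)
def pvMH (c : String) : Bool := pvHeavyPats.any (fun h => PySem.Str.isIn h c)
def pvMD (c : String) : Bool := pvDepPats.any (fun d => PySem.Str.isIn d c)

theorem pvFoldB (cs : List String) (fa he de no : List String) :
    cs.foldl pvStepB (fa, he, de, no) =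
      (fa ++ cs.filter pvMF, he ++ cs.filter pvMH, de ++ cs.filter pvMD,
       no ++ cs.filter (fun c => !(pvMF c || pvMH c || pvMD c))) := by
  induction cs generalizing fa he de no with
  | nil => simp
  | cons c cs ih =>
    simp only [List.foldl_cons, List.filter_cons]
    rw [pvStepB]
    simp only [pvMF, pvMH, pvMD] at *
    split_ifs with h1 h2 h3 <;> simp_all

theorem pvMem_grouped (cs : List String) (c : String) (hc : c ∈ cs) :
    (PySem.Set.contains
      (PySem.Set.ofList (cs.filter pvMF ++ cs.filter pvMH ++ cs.filter pvMD)) c)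
      = (pvMF c || pvMH c || pvMD c) := by
  by_cases h : (pvMF c || pvMH c || pvMD c) = true
  · rcases Bool.or_eq_true_iff.mp h with h' | hd
    · rcases Bool.or_eq_true_iff.mp h' with hf | hh
      · simp [hc, hf, PySem.Set.contains, PySem.Set.mem_ofList]
      · simp [hc, hh, PySem.Set.contains, PySem.Set.mem_ofList]
    · simp [hc, hd, PySem.Set.contains, PySem.Set.mem_ofList]
  · simp only [Bool.not_eq_true, Bool.or_eq_false_iff] at h
    simp [h.1.1, h.1.2, h.2, PySem.Set.contains, PySem.Set.mem_ofList]

-- ===== VERDICT (by name: the statement is the Claim_ definition above) =====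
theorem group_commands_by_priority_py_spec : Claim_equal_group_commands_by_priority_py := by
  intro commands _
  unfold Spec_group_commands_by_priority_py group_commands_by_priority_py group_commands_by_priority_py_alt
  simp only [show (fun c => pvFastPats.any (fun f => PySem.Str.isIn f c)) = pvMF from rfl,
             show (fun c => pvHeavyPats.any (fun h => PySem.Str.isIn h c)) = pvMH from rfl,
             show (fun c => pvDepPats.any (fun d => PySem.Str.isIn d c)) = pvMD from rfl]
  rw [pvFoldB]
  simp only [List.nil_append]
  have hn : commands.filter
      (fun c => !(PySem.Set.contains
        (PySem.Set.ofList (commands.filter pvMF ++ commands.filter pvMH ++ commands.filter pvMD)) c))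
      = commands.filter (fun c => !(pvMF c || pvMH c || pvMD c)) := by
    apply List.filter_congr
    intro c hc
    rw [pvMem_grouped commands c hc]
  rw [hn]
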